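-- pv_equiv track=rewrite | github.com/MrBrantCode/unitest_baseline | mut_generate/mist_train_cf/cf_17878/solution.py | find_longest_sequences
-- ===== SOURCE A (Python) =====
-- def find_longest_sequences(nums):
--     if len(nums) == 0:
--         return []
--
--     result = []
--     longest_seq = [nums[0]]
--
--     for i in range(1, len(nums)):
--         if nums[i] > nums[i-1]:
--             longest_seq.append(nums[i])
--         else:
--             if len(longest_seq) > 1:
--                 result.append(longest_seq)
--             longest_seq = [nums[i]]
--
--     if len(longest_seq) > 1:
--         result.append(longest_seq)
--
--     return result
-- ===== SOURCE B (Python) =====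
-- def find_longest_sequences(nums):
--     result = []
--     n = len(nums)
--     start = 0
--     for i in range(1, n + 1):
--         if i == n or nums[i] <= nums[i - 1]:
--             if i - start > 1:
--                 result.append(nums[start:i])
--             start = i
--     return result
-- ===== Notes on version B (the rewrite author's own statement) =====
-- stated objective: alternative
-- what changed: B tracks run boundaries by a single start index and emits nums[start:i] slices when a run closes, instead of growing a current-run list element by element.
import Mathlib
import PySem

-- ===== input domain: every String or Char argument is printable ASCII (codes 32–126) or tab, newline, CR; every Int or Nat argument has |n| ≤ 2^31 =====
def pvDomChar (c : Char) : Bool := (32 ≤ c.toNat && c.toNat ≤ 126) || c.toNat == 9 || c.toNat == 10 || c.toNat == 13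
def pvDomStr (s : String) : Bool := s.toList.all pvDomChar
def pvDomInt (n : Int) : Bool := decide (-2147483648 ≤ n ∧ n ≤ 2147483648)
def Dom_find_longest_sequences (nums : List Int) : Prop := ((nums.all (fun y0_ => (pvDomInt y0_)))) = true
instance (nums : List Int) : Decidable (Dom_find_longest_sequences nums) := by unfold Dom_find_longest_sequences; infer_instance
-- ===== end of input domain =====

-- B rewrites A with a start-index + slice decomposition instead of an accumulated run list; same cost.

-- ===== PORT A =====
-- the for-loop of A as structural recursion over the remaining elements,
-- with the same state (result, longest_seq) and prev = nums[i-1]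
def fls_go (result : List (List Int)) (seq : List Int) (prev : Int) : List Int → List (List Int)
  | [] => if seq.length > 1 then result ++ [seq] else result
  | x :: rest =>
    if prev < x then fls_go result (seq ++ [x]) x rest
    else fls_go (if seq.length > 1 then result ++ [seq] else result) [x] x rest

def find_longest_sequences (nums : List Int) : List (List Int) :=
  match nums with
  | [] => []
  | x :: rest => fls_go [] [x] x rest

-- ===== PORT B =====
-- one step of B's loop body; state is (result, start)
def flsStep (nums : List Int) (s : List (List Int) × Int) (i : Int) : List (List Int) × Int :=
  if i == (nums.length : Int) || (PySem.List.pyGetD nums i 0 ≤ PySem.List.pyGetD nums (i - 1) 0) then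
    ((if i - s.2 > 1 then s.1 ++ [PySem.List.slice nums (some s.2) (some i)] else s.1), i)
  else s

def find_longest_sequences_alt (nums : List Int) : List (List Int) :=
  ((PySem.List.pyRange 1 ((nums.length : Int) + 1) 1).foldl (flsStep nums) ([], 0)).1

-- ===== PRECONDITION & SPEC =====
def Spec_find_longest_sequences (nums : List Int) (out : List (List Int)) : Prop := out = find_longest_sequences_alt nums
instance (nums : List Int) (out : List (List Int)) : Decidable (Spec_find_longest_sequences nums out) := by unfold Spec_find_longest_sequences; infer_instance

-- ===== CLAIM (what is proved, stated in full; the proofs are below) =====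
def Claim_equal_find_longest_sequences : Prop := ∀ (nums : List Int), Dom_find_longest_sequences nums → Spec_find_longest_sequences nums (find_longest_sequences nums)

-- ===== LEMMAS AND PROOFS =====

theorem getD_append_length (pre ys : List Int) (y d : Int) :
    (pre ++ y :: ys).getD pre.length d = y := by
  simp [List.getD]

-- invariant bridge: B's fold from position i = (front ++ seq).length with start = front.length
-- computes exactly A's recursion with current run seq (ending in prev) over the remaining rest
theorem fls_bridge (rest : List Int) : ∀ (front seq : List Int) (result : List (List Int)) (prev : Int),
    seq ≠ [] → seq.getLast? = some prev →
    ((PySem.List.pyRange ((front ++ seq).length : Int) (((front ++ seq ++ rest).length : Int) + 1) 1).foldl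
        (flsStep (front ++ seq ++ rest)) (result, (front.length : Int))).1
      = fls_go result seq prev rest := by
  induction rest with
  | nil =>
    intro front seq result prev hne hlast
    have h1 : 1 ≤ seq.length := List.length_pos_of_ne_nil hne
    have hr : PySem.List.pyRange ((front ++ seq).length : Int) (((front ++ seq ++ []).length : Int) + 1) 1
        = [((front ++ seq).length : Int)] := by
      simp [PySem.List.pyRange_one_singleton]
    rw [hr]
    simp only [List.foldl_cons, List.foldl_nil, flsStep]
    have hcond : ((((front ++ seq).length : Int)) == (((front ++ seq ++ []).length : Int))) = true := by
      simp
    rw [hcond]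
    simp only [Bool.true_or]
    have hslice : PySem.List.slice (front ++ seq ++ []) (some (front.length : Int)) (some ((front ++ seq).length : Int))
        = seq := by
      rw [PySem.List.slice_natCast]
      simp
    rw [hslice]
    have hlen : (((front ++ seq).length : Int) - (front.length : Int) > 1) ↔ seq.length > 1 := by
      simp only [List.length_append]; omega
    unfold fls_go
    by_cases h : seq.length > 1
    · rw [if_pos (hlen.mpr h), if_pos h]; simp
    · rw [if_neg (fun hc => h (hlen.mp hc)), if_neg h]; simp
  | cons x rest ih =>
    intro front seq result prev hne hlast
    have h1 : 1 ≤ seq.length := List.length_pos_of_ne_nil hne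
    have hlt : ((front ++ seq).length : Int) < (((front ++ seq ++ (x :: rest)).length : Int) + 1) := by
      simp [List.length_append]; omega
    rw [PySem.List.pyRange_one_cons hlt, List.foldl_cons]
    have hneq : ((((front ++ seq).length : Int)) == (((front ++ seq ++ (x :: rest)).length : Int))) = false := by
      simp [List.length_append]; omega
    have hgi : PySem.List.pyGetD (front ++ seq ++ (x :: rest)) ((front ++ seq).length : Int) 0 = x := by
      rw [PySem.List.pyGetD_natCast]
      exact getD_append_length _ _ _ _
    have hdecomp : front ++ seq = (front ++ seq.dropLast) ++ [prev] := by
      conv_lhs => rw [← List.dropLast_append_getLast hne]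
      simp [List.getLast_eq_iff_getLast?_eq_some hne |>.mpr hlast]
    have hgi1 : PySem.List.pyGetD (front ++ seq ++ (x :: rest)) (((front ++ seq).length : Int) - 1) 0 = prev := by
      have hlen1 : ((front ++ seq).length : Int) - 1 = ((front ++ seq.dropLast).length : Int) := by
        rw [hdecomp]; simp only [List.length_append, List.length_singleton]; omega
      rw [hlen1, PySem.List.pyGetD_natCast]
      have h2 : front ++ seq ++ (x :: rest) = (front ++ seq.dropLast) ++ prev :: (x :: rest) := by
        conv_lhs => rw [hdecomp]
        simp
      rw [h2]; exact getD_append_length _ _ _ _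
    rw [show flsStep (front ++ seq ++ (x :: rest)) (result, (front.length : Int)) ((front ++ seq).length : Int)
        = if x ≤ prev then
            ((if ((front ++ seq).length : Int) - (front.length : Int) > 1 then
                result ++ [PySem.List.slice (front ++ seq ++ (x :: rest)) (some (front.length : Int)) (some ((front ++ seq).length : Int))]
              else result), ((front ++ seq).length : Int))
          else (result, (front.length : Int)) from by
      unfold flsStep; rw [hneq, hgi, hgi1]; simp]
    unfold fls_go
    by_cases hx : x ≤ prev
    · rw [if_pos hx, if_neg (show ¬ prev < x by omega)]
      have hslice : PySem.List.slice (front ++ seq ++ (x :: rest)) (some (front.length : Int)) (some ((front ++ seq).length : Int))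
          = seq := by
        rw [PySem.List.slice_natCast]
        simp
      rw [hslice]
      have hlen : (((front ++ seq).length : Int) - (front.length : Int) > 1) ↔ seq.length > 1 := by
        simp only [List.length_append]; omega
      have hih := ih (front ++ seq) [x]
        (if seq.length > 1 then result ++ [seq] else result) x (by simp) (by simp)
      simp only [List.append_assoc, List.cons_append, List.nil_append] at hih ⊢
      rw [show (((front ++ (seq ++ [x])).length : Int)) = ((front ++ seq).length : Int) + 1 by
        simp only [List.length_append, List.length_cons, List.length_nil]; omega] at hih
      by_cases h : seq.length > 1
      · rw [if_pos (hlen.mpr h), if_pos h]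
        rw [if_pos h] at hih
        exact hih
      · rw [if_neg (fun hc => h (hlen.mp hc)), if_neg h]
        rw [if_neg h] at hih
        exact hih
    · rw [if_neg hx, if_pos (show prev < x by omega)]
      have hih := ih front (seq ++ [x]) result x (by simp) (by simp)
      simp only [List.append_assoc, List.cons_append, List.nil_append] at hih ⊢
      rw [show (((front ++ (seq ++ [x])).length : Int)) = ((front ++ seq).length : Int) + 1 by
        simp only [List.length_append, List.length_cons, List.length_nil]; omega] at hih
      exact hih

-- ===== VERDICT (by name: the statement is the Claim_ definition above) =====
theorem find_longest_sequences_spec : Claim_equal_find_longest_sequences := by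
  intro nums _
  unfold Spec_find_longest_sequences find_longest_sequences find_longest_sequences_alt
  match nums with
  | [] => simp
  | x :: rest =>
    have h := fls_bridge rest [] [x] [] x (by simp) (by simp)
    simp only [List.nil_append, List.length_nil, List.length_cons,
      Nat.cast_zero, Nat.cast_add, Nat.cast_one, zero_add] at h ⊢
    exact h.symm
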